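-- pv_equiv track=rewrite | github.com/samgabel/Boot.Dev | python/1-basics/07.1-iterate-list.py | get_item_counts
-- ===== SOURCE A (Python) =====
-- def get_item_counts(items):
--     potion_count = 0
--     bread_count = 0
--     shortsword_count = 0
--
--     # for i in range(0, len(items)):
--     #     if items[i] == "Potion":
--     #         potion_count += 1
--     #     if items[i] == "Bread":
--     #         bread_count += 1
--     #     if items[i] == "Shortsword":
--     #         shortsword_count += 1
--     for item in items:
--         if item == "Potion":
--             potion_count += 1
--         if item == "Bread":
--             bread_count += 1
--         if item == "Shortsword":
--             shortsword_count += 1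
--
--     return potion_count, bread_count, shortsword_count
-- ===== SOURCE B (Python) =====
-- def get_item_counts(items):
--     return items.count("Potion"), items.count("Bread"), items.count("Shortsword")
-- ===== Notes on version B (the rewrite author's own statement) =====
-- stated objective: idiomatic
-- what changed: Replaces the single manual loop with three counters by three independent list.count scans returning the tuple directly.
import Mathlib
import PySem

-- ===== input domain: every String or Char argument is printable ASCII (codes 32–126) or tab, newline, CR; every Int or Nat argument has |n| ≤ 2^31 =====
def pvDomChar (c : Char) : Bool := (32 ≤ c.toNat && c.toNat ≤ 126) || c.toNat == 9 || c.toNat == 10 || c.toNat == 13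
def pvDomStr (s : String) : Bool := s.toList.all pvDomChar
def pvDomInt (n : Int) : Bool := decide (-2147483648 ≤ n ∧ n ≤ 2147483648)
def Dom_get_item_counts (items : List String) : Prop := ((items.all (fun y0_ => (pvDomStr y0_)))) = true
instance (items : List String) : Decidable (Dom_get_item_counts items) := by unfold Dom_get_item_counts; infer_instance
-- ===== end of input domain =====

-- B drops the manual counter loop for three independent list.count scans (idiomatic; same O(n) cost).


-- ===== PORT A =====
-- loop body of A: the three independent if-checks updating the three counters
def get_item_counts_step (acc : Int × Int × Int) (item : String) : Int × Int × Int :=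
  let acc := if item == "Potion" then (acc.1 + 1, acc.2.1, acc.2.2) else acc
  let acc := if item == "Bread" then (acc.1, acc.2.1 + 1, acc.2.2) else acc
  if item == "Shortsword" then (acc.1, acc.2.1, acc.2.2 + 1) else acc

def get_item_counts (items : List String) : Int × Int × Int :=
  items.foldl get_item_counts_step (0, 0, 0)

-- ===== PORT B =====
def get_item_counts_alt (items : List String) : Int × Int × Int :=
  ((PySem.List.count items "Potion" : Int),
   (PySem.List.count items "Bread" : Int),
   (PySem.List.count items "Shortsword" : Int))

-- ===== PRECONDITION & SPEC =====
def Spec_get_item_counts (items : List String) (out : Int × Int × Int) : Prop := out = get_item_counts_alt items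
instance (items : List String) (out : Int × Int × Int) : Decidable (Spec_get_item_counts items out) := by unfold Spec_get_item_counts; infer_instance

-- ===== CLAIM (what is proved, stated in full; the proofs are below) =====
def Claim_equal_get_item_counts : Prop := ∀ (items : List String), Dom_get_item_counts items → Spec_get_item_counts items (get_item_counts items)

-- ===== LEMMAS AND PROOFS =====
theorem get_item_counts_step_eq (a b c : Int) (x : String) :
    get_item_counts_step (a, b, c) x
    = (a + (if x = "Potion" then 1 else 0), b + (if x = "Bread" then 1 else 0),
       c + (if x = "Shortsword" then 1 else 0)) := by
  unfold get_item_counts_step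
  split_ifs <;> simp_all

theorem get_item_counts_loop (items : List String) (a b c : Int) :
    items.foldl get_item_counts_step (a, b, c)
    = (a + items.count "Potion", b + items.count "Bread", c + items.count "Shortsword") := by
  induction items generalizing a b c with
  | nil => simp
  | cons x xs ih =>
    rw [List.foldl_cons, get_item_counts_step_eq, ih]
    simp only [List.count_cons, beq_iff_eq]
    split_ifs <;> simp_all <;> ring

-- ===== VERDICT (by name: the statement is the Claim_ definition above) =====
theorem get_item_counts_spec : Claim_equal_get_item_counts := by
  intro items _
  unfold Spec_get_item_counts get_item_counts get_item_counts_alt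
  rw [get_item_counts_loop]
  simp [PySem.List.count_eq]
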